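-- pv_equiv track=rewrite | github.com/s3m3n1s/comp_networks_ITMO | translator.py | max_of_0n1
-- ===== SOURCE A (Python) =====
-- def max_of_0n1(bit_line):
--     max0 = 0
--     max1 = 0
--     cur0 = 0
--     cur1 = 0
--     cur = '-'
--     for i in bit_line:
--         cur = i
--         if i == cur == '0':
--             cur0 += 1
--             if cur0 > max0: max0 = cur0
--         else:
--             cur0 = 0
--         if i == cur == '1':
--             cur1 += 1
--             if cur1 > max1: max1 = cur1
--         else:
--             cur1 = 0
--     return [max0, max1]
-- ===== SOURCE B (Python) =====
-- def max_of_0n1(bit_line):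
--     def longest(ch):
--         runs = ''.join(c if c == ch else ' ' for c in bit_line).split()
--         return max(map(len, runs), default=0)
--     return [longest('0'), longest('1')]
-- ===== Notes on version B (the rewrite author's own statement) =====
-- stated objective: idiomatic
-- what changed: B replaces A's single pass with four running counters by masking, for each target character, every other character to a space, splitting the masked string on whitespace into the maximal runs, and taking the longest run length with default 0.
import Mathlib
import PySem

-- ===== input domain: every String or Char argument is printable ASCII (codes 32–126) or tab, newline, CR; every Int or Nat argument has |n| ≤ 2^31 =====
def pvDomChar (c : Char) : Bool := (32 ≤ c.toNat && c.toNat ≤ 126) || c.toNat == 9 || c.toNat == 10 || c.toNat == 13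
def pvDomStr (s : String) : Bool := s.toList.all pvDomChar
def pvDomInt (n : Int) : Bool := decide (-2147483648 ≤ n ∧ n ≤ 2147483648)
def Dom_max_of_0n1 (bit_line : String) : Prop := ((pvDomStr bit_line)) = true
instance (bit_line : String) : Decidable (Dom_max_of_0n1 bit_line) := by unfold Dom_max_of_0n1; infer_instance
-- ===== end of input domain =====

-- B replaces A's one-pass four-counter scan by masking non-target characters to spaces and
-- taking the longest whitespace-split run, for each of '0' and '1' (idiomatic; not faster).

-- ===== PORT A =====
-- the loop body of A (max0, max1, cur0, cur1, cur), transliterated step for step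
def maxStepA (s : Int × Int × Int × Int × Char) (i : Char) : Int × Int × Int × Int × Char :=
  let max0 := s.1; let max1 := s.2.1; let cur0 := s.2.2.1; let cur1 := s.2.2.2.1
  let cur := i
  let p0 : Int × Int :=
    if i == cur && cur == '0' then
      (cur0 + 1, if cur0 + 1 > max0 then cur0 + 1 else max0)
    else (0, max0)
  let p1 : Int × Int :=
    if i == cur && cur == '1' then
      (cur1 + 1, if cur1 + 1 > max1 then cur1 + 1 else max1)
    else (0, max1)
  (p0.2, p1.2, p0.1, p1.1, cur)

def max_of_0n1 (bit_line : String) : List Int :=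
  let st := bit_line.toList.foldl maxStepA (0, 0, 0, 0, '-')
  [st.1, st.2.1]

-- ===== PORT B =====
-- longest(ch): mask every other character to ' ', split on whitespace, max length (default 0)
def maskLongest (ch : Char) (s : List Char) : Int :=
  (PySem.List.max?
    ((PySem.Chars.split₀ (s.map (fun c => if c == ch then c else ' '))).map
      (fun r => (r.length : Int))) (fun x => x)).getD 0

def max_of_0n1_alt (bit_line : String) : List Int :=
  [maskLongest '0' bit_line.toList, maskLongest '1' bit_line.toList]

-- ===== PRECONDITION & SPEC =====
def Spec_max_of_0n1 (bit_line : String) (out : List Int) : Prop := out = max_of_0n1_alt bit_line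
instance (bit_line : String) (out : List Int) : Decidable (Spec_max_of_0n1 bit_line out) := by unfold Spec_max_of_0n1; infer_instance

-- ===== CLAIM (what is proved, stated in full; the proofs are below) =====
def Claim_equal_max_of_0n1 : Prop := ∀ (bit_line : String), Dom_max_of_0n1 bit_line → Spec_max_of_0n1 bit_line (max_of_0n1 bit_line)

-- ===== LEMMAS AND PROOFS =====

-- a cleaned-up single-character step: state (best so far, current run)
def stepC (ch : Char) (s : Int × Int) (i : Char) : Int × Int :=
  if i == ch then (s.1 ⊔ (s.2 + 1), s.2 + 1) else (s.1, 0)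

theorem ite_gt_max (m x : Int) : (if x > m then x else m) = m ⊔ x := by
  simp only [max_def]; split_ifs <;> omega

-- A's four-counter fold projects onto two independent stepC folds
theorem decomp0 (l : List Char) : ∀ (m0 m1 c0 c1 : Int) (cv : Char),
    (l.foldl maxStepA (m0, m1, c0, c1, cv)).1 = (l.foldl (stepC '0') (m0, c0)).1 := by
  induction l with
  | nil => intros; rfl
  | cons i t ih =>
    intro m0 m1 c0 c1 cv
    simp only [List.foldl_cons, maxStepA, stepC, BEq.rfl, Bool.true_and]
    by_cases h0 : i == '0' <;> simp only [h0, if_true, if_false, ite_gt_max] <;> apply ih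

theorem decomp1 (l : List Char) : ∀ (m0 m1 c0 c1 : Int) (cv : Char),
    (l.foldl maxStepA (m0, m1, c0, c1, cv)).2.1 = (l.foldl (stepC '1') (m1, c1)).1 := by
  induction l with
  | nil => intros; rfl
  | cons i t ih =>
    intro m0 m1 c0 c1 cv
    simp only [List.foldl_cons, maxStepA, stepC, BEq.rfl, Bool.true_and]
    by_cases h1 : i == '1' <;> simp only [h1, if_true, if_false, ite_gt_max] <;> apply ih

-- the best-so-far component of a stepC fold is max-extractable
theorem stepC_extract (ch : Char) (l : List Char) : ∀ (c a b : Int),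
    (l.foldl (stepC ch) (a ⊔ b, c)).1 = a ⊔ (l.foldl (stepC ch) (b, c)).1 := by
  induction l with
  | nil => intros; rfl
  | cons i t ih =>
    intro c a b
    simp only [List.foldl_cons, stepC]
    by_cases h : i == ch <;> simp only [h, if_true, if_false]
    · rw [max_assoc]; exact ih _ _ _
    · exact ih _ _ _

theorem stepC_fst_nonneg (ch : Char) (l : List Char) : ∀ (a c : Int), 0 ≤ a →
    0 ≤ (l.foldl (stepC ch) (a, c)).1 := by
  induction l with
  | nil => intro a c h; exact h
  | cons i t ih =>
    intro a c h
    simp only [List.foldl_cons, stepC]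
    by_cases hi : i == ch <;> simp only [hi, if_true, if_false]
    · exact ih _ _ (le_trans h (le_max_left _ _))
    · exact ih _ _ h

-- max of a list of Ints, seeded with 0
def mli (xs : List Int) : Int := xs.foldl max 0

theorem foldl_max_extract (xs : List Int) : ∀ (a b : Int),
    xs.foldl max (a ⊔ b) = a ⊔ xs.foldl max b := by
  induction xs with
  | nil => intros; rfl
  | cons x t ih => intro a b; simp only [List.foldl_cons, max_assoc]; exact ih _ _

theorem mli_cons (x : Int) (xs : List Int) : mli (x :: xs) = x ⊔ mli xs := by
  simp only [mli, List.foldl_cons]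
  have : max (0 : Int) x = x ⊔ 0 := by rw [max_comm]
  rw [this, foldl_max_extract]

theorem mli_nonneg (xs : List Int) : 0 ≤ mli xs := by
  induction xs with
  | nil => simp [mli]
  | cons x t ih => rw [mli_cons]; exact le_trans ih (le_max_right _ _)

theorem mli_append (xs ys : List Int) : mli (xs ++ ys) = mli xs ⊔ mli ys := by
  induction xs with
  | nil =>
    simp only [List.nil_append]
    exact (max_eq_right (mli_nonneg ys)).symm
  | cons x t ih => simp only [List.cons_append, mli_cons, ih, max_assoc]

theorem mli_reverse (xs : List Int) : mli xs.reverse = mli xs := by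
  induction xs with
  | nil => rfl
  | cons x t ih =>
    rw [List.reverse_cons, mli_append, ih, mli_cons]
    have h0 : (0 : Int) ≤ List.foldl max 0 t := mli_nonneg t
    simp only [mli, List.foldl_cons, List.foldl_nil]
    rw [show max (0 : Int) x = x ⊔ 0 from max_comm 0 x, foldl_max_extract]
    simp only [max_def]
    split_ifs <;> omega

def lens (rs : List (List Char)) : List Int := rs.map (fun r => (r.length : Int))

-- the heart: split₀.go on the masked list computes the same maximum as the stepC fold
theorem go_mli (ch : Char) (hch : PySem.Chars.isspace ch = false) (l : List Char) :
    ∀ (cur : List Char) (acc : List (List Char)),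
    mli (lens (PySem.Chars.split₀.go (l.map (fun c => if c == ch then c else ' ')) cur acc))
      = mli (lens acc) ⊔ (l.foldl (stepC ch) ((cur.length : Int), (cur.length : Int))).1 := by
  induction l with
  | nil =>
    intro cur acc
    simp only [List.map_nil, PySem.Chars.split₀.go, List.foldl_nil]
    by_cases hc : cur.isEmpty
    · simp only [hc, if_true]
      rw [show (cur.length : Int) = 0 by simp [List.isEmpty_iff.mp hc]]
      rw [show lens acc.reverse = (lens acc).reverse by simp [lens]]
      rw [mli_reverse, max_eq_left (mli_nonneg _)]
    · simp only [hc, Bool.false_eq_true, if_false]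
      rw [show lens ((cur.reverse :: acc).reverse) = (lens (cur.reverse :: acc)).reverse by
            simp [lens]]
      rw [mli_reverse,
        show lens (cur.reverse :: acc) = ((cur.reverse.length : Int)) :: lens acc from rfl,
        mli_cons]
      simp [max_comm]
  | cons c t ih =>
    intro cur acc
    simp only [List.map_cons, List.foldl_cons]
    by_cases hc : c == ch
    · have hceq : c = ch := eq_of_beq hc
      simp only [hc, if_true, hceq, PySem.Chars.split₀.go, hch, Bool.false_eq_true, if_false,
        stepC, BEq.rfl]
      rw [ih (ch :: cur) acc]
      have : max ((cur.length : Int)) ((cur.length : Int) + 1) = (cur.length : Int) + 1 := by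
        omega
      simp [this]
    · have hsp : PySem.Chars.isspace ' ' = true := by decide
      simp only [hc, Bool.false_eq_true, if_false, PySem.Chars.split₀.go, hsp, if_true, stepC]
      by_cases hcur : cur.isEmpty
      · simp only [hcur, if_true]
        
        rw [ih [] acc]
        simp [List.isEmpty_iff.mp hcur]
      · simp only [hcur, Bool.false_eq_true, if_false]
        rw [ih [] (cur.reverse :: acc)]
        simp only [List.length_nil, Nat.cast_zero]
        rw [show lens (cur.reverse :: acc) = (cur.reverse.length : Int) :: lens acc from rfl]
        rw [mli_cons]
        have hx : ((cur.length : Int)) = (cur.length : Int) ⊔ 0 := by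
          rw [max_eq_left]; positivity
        rw [hx, stepC_extract]
        simp only [List.length_reverse]
        simp only [max_comm, max_left_comm, max_assoc]

theorem maxD_eq_mli (rs : List (List Char)) :
    (PySem.List.max? (lens rs) (fun x => x)).getD 0 = mli (lens rs) := by
  cases rs with
  | nil => rfl
  | cons r t =>
    rw [show lens (r :: t) = (r.length : Int) :: lens t from rfl]
    rw [PySem.List.max?_id_cons, Option.getD_some, mli_cons]
    have hx : ((r.length : Int)) = (r.length : Int) ⊔ 0 := by rw [max_eq_left]; positivity
    conv_lhs => rw [hx]
    rw [foldl_max_extract]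
    rfl

theorem maskLongest_eq (ch : Char) (hch : PySem.Chars.isspace ch = false) (l : List Char) :
    maskLongest ch l = (l.foldl (stepC ch) (0, 0)).1 := by
  unfold maskLongest
  rw [show ((PySem.Chars.split₀ (l.map (fun c => if c == ch then c else ' '))).map
        (fun r => (r.length : Int)))
      = lens (PySem.Chars.split₀ (l.map (fun c => if c == ch then c else ' '))) from rfl]
  rw [maxD_eq_mli]
  have := go_mli ch hch l [] []
  simp only [List.length_nil, Nat.cast_zero] at this
  rw [show PySem.Chars.split₀
        (l.map (fun c => if c == ch then c else ' ')) =
      PySem.Chars.split₀.go (l.map (fun c => if c == ch then c else ' ')) [] [] from rfl]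
  rw [this]
  rw [show mli (lens []) = 0 from rfl]
  exact max_eq_right (stepC_fst_nonneg ch l 0 0 le_rfl)

-- ===== VERDICT (by name: the statement is the Claim_ definition above) =====
theorem max_of_0n1_spec : Claim_equal_max_of_0n1 := by
  intro bit_line _
  unfold Spec_max_of_0n1 max_of_0n1 max_of_0n1_alt
  rw [maskLongest_eq '0' (by decide), maskLongest_eq '1' (by decide)]
  rw [← decomp0 bit_line.toList 0 0 0 0 '-', ← decomp1 bit_line.toList 0 0 0 0 '-']
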